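-- pv_equiv track=rewrite | github.com/camiloaacevedo/counting-techniques | Entregable2.py | recorrido_especial
-- ===== SOURCE A (Python) =====
-- def recorrido_especial(A1, A2, M, m = 0, n = 0, direccion_vertical=1):
--
--     if n >= len(M[0]):
--         return
--
--     num_filas = len(M)
--
--     A1.append(M[m][n])
--     A2.append([m, n])
--
--     siguiente_fila = m + direccion_vertical
--     siguiente_columna = n
--
--     if 0 <= siguiente_fila < num_filas:
--         recorrido_especial(A1, A2, M, siguiente_fila, n, direccion_vertical)
--
--     else:
--         nueva_direccion = -direccion_vertical
--
--         siguiente_columna = n + 1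
--
--         if direccion_vertical == 1:
--             fila_inicio = num_filas - 1
--         else:
--             fila_inicio = 0
--
--         if siguiente_columna < len(M[0]):
--              recorrido_especial(A1, A2, M, fila_inicio, siguiente_columna, nueva_direccion)
--
--     return A1, A2
-- ===== SOURCE B (Python) =====
-- # Column-by-column iterative walk: for each column compute the visited row walk
-- # first, then extend A1/A2 in bulk; mutates A1 and A2 in place like the original.
-- def recorrido_especial(A1, A2, M, m=0, n=0, direccion_vertical=1):
--     cols = len(M[0])
--     if n >= cols:
--         return None
--     rows = len(M)
--     s, d = m, direccion_vertical
--     for col in range(n, cols):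
--         walk = []
--         r = s
--         while 0 <= r < rows:
--             walk.append(r)
--             r += d
--         A1.extend(M[r][col] for r in walk)
--         A2.extend([r, col] for r in walk)
--         s = rows - 1 if d == 1 else 0
--         d = -d
--     return A1, A2
-- ===== Notes on version B (the rewrite author's own statement) =====
-- stated objective: simpler
-- what changed: Replaces A's per-cell recursion (one call per visited cell, rebuilding direction/flip logic at every step) with an iterative column-by-column loop that first computes each column's row walk and then extends A1/A2 in bulk.
-- outside the precondition, e.g. on recorrido_especial([], [], [[1]], -1, 0, 1): A returns ([1, 1], [[-1, 0], [0, 0]]), B returns ([], [])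
import Mathlib
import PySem

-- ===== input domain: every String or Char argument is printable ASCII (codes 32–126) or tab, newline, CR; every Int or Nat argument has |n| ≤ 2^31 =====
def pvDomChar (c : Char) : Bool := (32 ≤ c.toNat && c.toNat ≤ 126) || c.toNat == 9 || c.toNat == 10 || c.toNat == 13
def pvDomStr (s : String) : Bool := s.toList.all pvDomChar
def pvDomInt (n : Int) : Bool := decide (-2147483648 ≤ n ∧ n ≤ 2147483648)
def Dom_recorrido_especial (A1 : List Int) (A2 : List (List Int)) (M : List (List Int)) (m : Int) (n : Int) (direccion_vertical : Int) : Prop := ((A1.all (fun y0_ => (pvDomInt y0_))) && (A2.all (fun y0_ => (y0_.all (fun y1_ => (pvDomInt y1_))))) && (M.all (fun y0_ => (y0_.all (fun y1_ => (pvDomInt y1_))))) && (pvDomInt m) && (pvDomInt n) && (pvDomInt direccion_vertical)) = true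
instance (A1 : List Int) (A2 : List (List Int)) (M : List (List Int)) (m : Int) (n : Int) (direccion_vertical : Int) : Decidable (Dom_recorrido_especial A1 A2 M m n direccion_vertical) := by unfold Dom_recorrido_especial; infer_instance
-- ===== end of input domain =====

-- B replaces A's per-cell recursion with an iterative column-by-column walk (same
-- objective cost, plainer decomposition); equivalence is about the RETURN value —
-- both Pythons also mutate A1/A2 in place in the same way.

-- ===== PORT A =====
-- A's recursion, state-threaded (A1/A2 are the mutated lists); fuel only makes the
-- same recursion total in Lean — it is large enough for every input admitted by Pre_.
def pvGoA (M : List (List Int)) (rows cols : Int) :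
    Nat → List Int → List (List Int) → Int → Int → Int → List Int × List (List Int)
  | 0, A1, A2, _, _, _ => (A1, A2)
  | Nat.succ f, A1, A2, m, n, d =>
    if cols ≤ n then (A1, A2)                    -- 'if n >= len(M[0]): return'
    else
      match PySem.List.pyGet? M m with           -- M[m]  (IndexError → excluded by Pre_)
      | none => (A1, A2)
      | some row =>
        match PySem.List.pyGet? row n with       -- M[m][n]
        | none => (A1, A2)
        | some v =>
          let A1' := A1 ++ [v]                   -- A1.append(M[m][n])
          let A2' := A2 ++ [[m, n]]              -- A2.append([m, n])
          if 0 ≤ m + d ∧ m + d < rows then       -- 0 <= siguiente_fila < num_filas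
            pvGoA M rows cols f A1' A2' (m + d) n d
          else
            if n + 1 < cols then                 -- siguiente_columna < len(M[0])
              pvGoA M rows cols f A1' A2' (if d = 1 then rows - 1 else 0) (n + 1) (-d)
            else (A1', A2')

def recorrido_especial (A1 : List Int) (A2 : List (List Int)) (M : List (List Int)) (m : Int) (n : Int) (direccion_vertical : Int) : Option (List Int × List (List Int)) :=
  match M with
  | [] => none                                   -- len(M[0]) raises; excluded by Pre_
  | r0 :: _ =>
    if (r0.length : Int) ≤ n then none           -- top-level 'return' (None)
    else some (pvGoA M (M.length : Int) (r0.length : Int)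
                ((M.length + 1) * (2 * r0.length + 2) + 1) A1 A2 m n direccion_vertical)

-- ===== PORT B =====
-- 'walk = []; r = s; while 0 <= r < rows: walk.append(r); r += d'
-- (fuel rows+1 makes the while total; enough whenever d ≠ 0, as Pre_ demands)
def pvColWalk (rows d : Int) : Int → Nat → List Int
  | _, 0 => []
  | r, Nat.succ f => if 0 ≤ r ∧ r < rows then r :: pvColWalk rows d (r + d) f else []

-- M[r][col] (in range for every r produced by the walk, under Pre_)
def pvCell (M : List (List Int)) (r c : Int) : Int :=
  (PySem.List.pyGet? ((PySem.List.pyGet? M r).getD []) c).getD 0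

-- one iteration of B's 'for col in range(n, cols)' loop on state (A1, A2, s, d)
def pvStepCol (M : List (List Int)) (rows : Int)
    (st : List Int × List (List Int) × Int × Int) (col : Int) :
    List Int × List (List Int) × Int × Int :=
  match st with
  | (A1, A2, s, d) =>
    let ws := pvColWalk rows d s (rows.toNat + 1)
    (A1 ++ ws.map (fun r => pvCell M r col),     -- A1.extend(M[r][col] for r in walk)
     A2 ++ ws.map (fun r => [r, col]),           -- A2.extend([r, col] for r in walk)
     if d = 1 then rows - 1 else 0,              -- s = rows - 1 if d == 1 else 0
     -d)                                         -- d = -d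

def recorrido_especial_alt (A1 : List Int) (A2 : List (List Int)) (M : List (List Int)) (m : Int) (n : Int) (direccion_vertical : Int) : Option (List Int × List (List Int)) :=
  match M with
  | [] => none                                   -- len(M[0]) raises; excluded by Pre_
  | r0 :: _ =>
    if (r0.length : Int) ≤ n then none
    else
      let st := (PySem.List.pyRange n (r0.length : Int) 1).foldl
                  (pvStepCol M (M.length : Int)) (A1, A2, m, direccion_vertical)
      some (st.1, st.2.1)

-- ===== PRECONDITION & SPEC =====
-- Pre_ excludes the inputs where A raises (empty M: IndexError; out-of-range start
-- row m: IndexError; direccion_vertical = 0: RecursionError) and, as a stated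
-- narrowing, two kinds of inputs on which A can still return: matrices with a row
-- shorter than the first (whether A raises there depends on which cells the walk
-- visits, not on a closed-form shape condition), and a negative start row m, where
-- A's visit order is an accident of Python's negative-index wraparound, not part of
-- the zigzag traversal.
def Pre_recorrido_especial (A1 : List Int) (A2 : List (List Int)) (M : List (List Int)) (m : Int) (n : Int) (direccion_vertical : Int) : Prop :=
  M ≠ [] ∧
  (((M.headD []).length : Int) ≤ n ∨
    ((∀ row ∈ M, (M.headD []).length ≤ row.length) ∧
      0 ≤ m ∧ m < (M.length : Int) ∧ -((M.headD []).length : Int) ≤ n ∧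
      direccion_vertical ≠ 0))
instance (A1 : List Int) (A2 : List (List Int)) (M : List (List Int)) (m : Int) (n : Int) (direccion_vertical : Int) : Decidable (Pre_recorrido_especial A1 A2 M m n direccion_vertical) := by unfold Pre_recorrido_especial; infer_instance

def pvWitness_recorrido_especial : List Int × List (List Int) × List (List Int) × Int × Int × Int :=
  ([], [], [[1, 2], [3, 4]], 0, 0, 1)

def Spec_recorrido_especial (A1 : List Int) (A2 : List (List Int)) (M : List (List Int)) (m : Int) (n : Int) (direccion_vertical : Int) (out : Option (List Int × List (List Int))) : Prop := out = recorrido_especial_alt A1 A2 M m n direccion_vertical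
instance (A1 : List Int) (A2 : List (List Int)) (M : List (List Int)) (m : Int) (n : Int) (direccion_vertical : Int) (out : Option (List Int × List (List Int))) : Decidable (Spec_recorrido_especial A1 A2 M m n direccion_vertical out) := by unfold Spec_recorrido_especial; infer_instance

-- ===== CLAIM (what is proved, stated in full; the proofs are below) =====
def Claim_equal_recorrido_especial : Prop := ∀ (A1 : List Int) (A2 : List (List Int)) (M : List (List Int)) (m : Int) (n : Int) (direccion_vertical : Int), Dom_recorrido_especial A1 A2 M m n direccion_vertical → Pre_recorrido_especial A1 A2 M m n direccion_vertical → Spec_recorrido_especial A1 A2 M m n direccion_vertical (recorrido_especial A1 A2 M m n direccion_vertical)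

-- ===== LEMMAS AND PROOFS =====

-- steps the walk may still take from row r
def pvColRem (rows r d : Int) : Nat := if 0 < d then (rows - r).toNat else (r + 1).toNat

-- steps the whole traversal may still take from state (m, n, d)
def pvSR (rows cols m n d : Int) : Nat := (cols - n).toNat * rows.toNat + pvColRem rows m d

theorem pvColWalk_fuel_succ (rows d r : Int) (hd : d ≠ 0) :
    ∀ f : Nat, pvColRem rows r d ≤ f →
      pvColWalk rows d r (f + 1) = pvColWalk rows d r f := by
  intro f
  induction f using Nat.strong_induction_on generalizing r with
  | _ f ih =>
    intro hle
    by_cases hin : 0 ≤ r ∧ r < rows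
    · have hrem1 : 1 ≤ pvColRem rows r d := by
        unfold pvColRem; split_ifs <;> omega
      obtain ⟨f', rfl⟩ : ∃ f', f = f' + 1 := ⟨f - 1, by omega⟩
      have hlt : pvColRem rows (r + d) d < pvColRem rows r d := by
        unfold pvColRem at *; split_ifs <;> omega
      have hrec := ih f' (by omega) (r + d) (by omega)
      simp only [pvColWalk, if_pos hin]
      rw [← hrec]
      rfl
    · cases f <;> simp [pvColWalk, hin]

theorem pvGoA_eq_fold (M : List (List Int)) (r0 : List Int) (rest : List (List Int))
    (hM : M = r0 :: rest)
    (hrect : ∀ row ∈ M, r0.length ≤ row.length) :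
    ∀ f : Nat, ∀ (A1 : List Int) (A2 : List (List Int)) (m n d : Int),
      0 ≤ m → m < (M.length : Int) → -(r0.length : Int) ≤ n → n < (r0.length : Int) →
      d ≠ 0 →
      pvSR (M.length : Int) (r0.length : Int) m n d ≤ f →
      pvGoA M (M.length : Int) (r0.length : Int) f A1 A2 m n d =
        (let st := (PySem.List.pyRange n (r0.length : Int) 1).foldl
                    (pvStepCol M (M.length : Int)) (A1, A2, m, d)
         (st.1, st.2.1)) := by
  intro f
  induction f with
  | zero =>
    intro A1 A2 m n d hm0 hm1 hn0 hn1 hd hf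
    exfalso
    have : 1 ≤ pvColRem (M.length : Int) m d := by
      unfold pvColRem; split_ifs <;> omega
    unfold pvSR at hf; omega
  | succ f ih =>
    intro A1 A2 m n d hm0 hm1 hn0 hn1 hd hf
    set rows : Int := (M.length : Int) with hrowsdef
    set cols : Int := (r0.length : Int) with hcolsdef
    have hrows1 : (1 : Int) ≤ rows := by
      simp only [hrowsdef, hM]; exact_mod_cast Nat.succ_le_of_lt (Nat.succ_pos _)
    have hcols1 : (1 : Int) ≤ cols := by omega
    -- M[m] = some row, with row.length = cols
    obtain ⟨row, hrow, hrowlen⟩ :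
        ∃ row, PySem.List.pyGet? M m = some row ∧ cols ≤ (row.length : Int) := by
      have hmlt : m.toNat < M.length := by omega
      refine ⟨M[m.toNat], ?_, ?_⟩
      · rw [PySem.List.pyGet?_of_nonneg _ hm0]
        simp [hmlt]
      · have := hrect M[m.toNat] (List.getElem_mem hmlt)
        simp only [hcolsdef]
        exact_mod_cast this
    obtain ⟨v, hv⟩ : ∃ v, PySem.List.pyGet? row n = some v := by
      have hne : PySem.List.pyGet? row n ≠ none := by
        intro h
        rw [PySem.List.pyGet?_eq_none_iff] at h
        exact h ⟨by omega, by omega⟩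
      cases h : PySem.List.pyGet? row n with
      | none => exact absurd h hne
      | some v => exact ⟨v, rfl⟩
    have hcell : pvCell M m n = v := by
      unfold pvCell; rw [hrow]; simp [hv]
    -- peel column n from the range
    have hpeel : PySem.List.pyRange n cols 1 = n :: PySem.List.pyRange (n + 1) cols 1 :=
      PySem.List.pyRange_one_cons (by omega)
    -- the walk from m in column n
    have hwalkm : pvColWalk rows d m (rows.toNat + 1) =
        m :: pvColWalk rows d (m + d) rows.toNat := by
      simp only [pvColWalk]
      rw [if_pos ⟨hm0, hm1⟩]
    -- unfold one step of A
    have hgoal :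
        pvGoA M rows cols (f + 1) A1 A2 m n d =
          (if 0 ≤ m + d ∧ m + d < rows then
            pvGoA M rows cols f (A1 ++ [v]) (A2 ++ [[m, n]]) (m + d) n d
          else
            if n + 1 < cols then
              pvGoA M rows cols f (A1 ++ [v]) (A2 ++ [[m, n]])
                (if d = 1 then rows - 1 else 0) (n + 1) (-d)
            else (A1 ++ [v], A2 ++ [[m, n]])) := by
      simp only [pvGoA, if_neg (by omega : ¬ cols ≤ n), hrow, hv]
    rw [hgoal]
    by_cases hstay : 0 ≤ m + d ∧ m + d < rows
    · -- stay in the column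
      rw [if_pos hstay]
      have hSR : pvSR rows cols (m + d) n d ≤ f := by
        have hlt : pvColRem rows (m + d) d < pvColRem rows m d := by
          unfold pvColRem; split_ifs <;> omega
        unfold pvSR at *; omega
      rw [ih (A1 ++ [v]) (A2 ++ [[m, n]]) (m + d) n d hstay.1 hstay.2 hn0 hn1 hd hSR]
      -- same fold, states equal after processing column n
      have hwalk2 : pvColWalk rows d (m + d) (rows.toNat + 1) =
          pvColWalk rows d (m + d) rows.toNat := by
        apply pvColWalk_fuel_succ rows d (m + d) hd
        unfold pvColRem; split_ifs <;> omega
      have hstep : pvStepCol M rows (A1, A2, m, d) n =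
          pvStepCol M rows (A1 ++ [v], A2 ++ [[m, n]], m + d, d) n := by
        simp only [pvStepCol, hwalkm, hwalk2, List.map_cons, hcell]
        simp
      rw [hpeel, List.foldl_cons, List.foldl_cons, hstep]
    · -- leave the column
      rw [if_neg hstay]
      have hwalk2 : pvColWalk rows d (m + d) rows.toNat = [] := by
        cases h : rows.toNat with
        | zero => simp [pvColWalk]
        | succ k => simp only [pvColWalk]; rw [if_neg (by omega)]
      have hws : pvColWalk rows d m (rows.toNat + 1) = [m] := by
        rw [hwalkm, hwalk2]
      have hstep : pvStepCol M rows (A1, A2, m, d) n =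
          (A1 ++ [v], A2 ++ [[m, n]], if d = 1 then rows - 1 else 0, -d) := by
        simp only [pvStepCol, hws, List.map_cons, List.map_nil, hcell]
      by_cases hnext : n + 1 < cols
      · rw [if_pos hnext]
        have hfi0 : 0 ≤ (if d = 1 then rows - 1 else 0) := by split_ifs <;> omega
        have hfi1 : (if d = 1 then rows - 1 else 0) < rows := by split_ifs <;> omega
        have hcr : pvColRem rows (if d = 1 then rows - 1 else 0) (-d) ≤ rows.toNat := by
          unfold pvColRem; split_ifs <;> omega
        have hSR : pvSR rows cols (if d = 1 then rows - 1 else 0) (n + 1) (-d) ≤ f := by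
          unfold pvSR at hf ⊢
          have hX : (cols - n).toNat = (cols - (n + 1)).toNat + 1 := by omega
          have hrem1 : 1 ≤ pvColRem rows m d := by
            unfold pvColRem; split_ifs <;> omega
          calc (cols - (n + 1)).toNat * rows.toNat +
                  pvColRem rows (if d = 1 then rows - 1 else 0) (-d)
              ≤ (cols - (n + 1)).toNat * rows.toNat + rows.toNat :=
                Nat.add_le_add_left hcr _
            _ = ((cols - (n + 1)).toNat + 1) * rows.toNat := by ring
            _ = (cols - n).toNat * rows.toNat := by rw [← hX]
            _ ≤ f := by omega
        rw [ih (A1 ++ [v]) (A2 ++ [[m, n]]) _ (n + 1) (-d) hfi0 hfi1 (by omega)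
              hnext (by simpa using hd) hSR]
        rw [hpeel, List.foldl_cons, hstep]
      · rw [if_neg hnext]
        have hempty : PySem.List.pyRange (n + 1) cols 1 = [] :=
          PySem.List.pyRange_one_eq_nil (by omega)
        rw [hpeel, List.foldl_cons, hstep, hempty, List.foldl_nil]

-- ===== VERDICT (by name: the statement is the Claim_ definition above) =====
theorem recorrido_especial_spec : Claim_equal_recorrido_especial := by
  intro A1 A2 M m n d _ hpre
  unfold Spec_recorrido_especial
  obtain ⟨hM, hpre⟩ := hpre
  obtain ⟨r0, rest, rfl⟩ : ∃ r0 rest, M = r0 :: rest := by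
    cases M with
    | nil => exact absurd rfl hM
    | cons a b => exact ⟨a, b, rfl⟩
  by_cases hn : (r0.length : Int) ≤ n
  · simp [recorrido_especial, recorrido_especial_alt, hn]
  · rcases hpre with hge | ⟨hrect, hm0, hm1, hn0, hd⟩
    · exact absurd (by simpa using hge) hn
    · simp only [recorrido_especial, recorrido_especial_alt, if_neg hn]
      congr 1
      apply pvGoA_eq_fold _ r0 rest rfl (by simpa using hrect)
      · exact hm0
      · exact hm1
      · simpa using hn0
      · omega
      · exact hd
      · -- fuel is ample: pvSR ≤ (rows+1)*(2*cols+2)+1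
        unfold pvSR pvColRem
        have hn0' : -(r0.length : Int) ≤ n := by simpa using hn0
        have h1 : (( (r0.length : Int) - n).toNat) ≤ 2 * r0.length := by omega
        have h2 : (if 0 < d then (((r0 :: rest).length : Int) - m).toNat
                    else (m + 1).toNat) ≤ (r0 :: rest).length := by
          split_ifs <;> omega
        have h3 : (( (r0.length : Int) - n).toNat) * (((r0 :: rest).length : Int)).toNat
            ≤ 2 * r0.length * (r0 :: rest).length :=
          Nat.mul_le_mul h1 (by omega)
        nlinarith [h3, h2]
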